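-- pv_equiv track=rewrite | github.com/Ryan-137/knowledge_graph | src/relation_extraction/dataset.py | _build_piece_ids
-- ===== SOURCE A (Python) =====
-- def _build_piece_ids(
--     sequence_length: int,
--     subject_span: tuple[int, int],
--     object_span: tuple[int, int],
-- ) -> list[int]:
--     first_start = min(subject_span[0], object_span[0])
--     second_start = max(subject_span[0], object_span[0])
--     piece_ids: list[int] = []
--     for token_index in range(sequence_length):
--         if token_index <= first_start:
--             piece_ids.append(1)
--         elif token_index < second_start:
--             piece_ids.append(2)
--         else:
--             piece_ids.append(3)
--     return piece_ids
-- ===== SOURCE B (Python) =====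
-- def _build_piece_ids(
--     sequence_length: int,
--     subject_span: tuple[int, int],
--     object_span: tuple[int, int],
-- ) -> list[int]:
--     first_start = min(subject_span[0], object_span[0])
--     second_start = max(subject_span[0], object_span[0])
--     n1 = max(0, min(first_start + 1, sequence_length))
--     n2 = max(0, min(second_start, sequence_length) - n1)
--     n3 = sequence_length - n1 - n2
--     return [1] * n1 + [2] * n2 + [3] * n3
-- ===== Notes on version B (the rewrite author's own statement) =====
-- stated objective: simpler
-- what changed: Replaces the per-index comparison loop with arithmetic: the three segment lengths are computed by clamping the two span boundaries and the result is three constant blocks concatenated.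
import Mathlib
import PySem

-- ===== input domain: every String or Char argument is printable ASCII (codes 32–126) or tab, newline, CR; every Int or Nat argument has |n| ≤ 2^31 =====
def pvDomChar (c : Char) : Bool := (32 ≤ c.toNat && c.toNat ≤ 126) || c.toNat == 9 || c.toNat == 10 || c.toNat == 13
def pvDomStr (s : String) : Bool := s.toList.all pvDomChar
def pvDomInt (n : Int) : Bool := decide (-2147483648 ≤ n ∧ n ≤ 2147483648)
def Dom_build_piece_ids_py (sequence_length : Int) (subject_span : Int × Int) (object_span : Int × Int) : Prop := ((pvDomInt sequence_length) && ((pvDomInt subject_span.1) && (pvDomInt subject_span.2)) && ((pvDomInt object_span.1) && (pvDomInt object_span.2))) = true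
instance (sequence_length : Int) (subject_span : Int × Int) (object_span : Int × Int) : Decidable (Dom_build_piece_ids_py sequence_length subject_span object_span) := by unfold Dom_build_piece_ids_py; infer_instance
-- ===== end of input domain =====

-- B replaces A's per-index comparison loop by three constant blocks whose lengths are clamped boundary arithmetic (objective: simpler).

-- ===== PORT A =====
def build_piece_ids_py (sequence_length : Int) (subject_span : Int × Int) (object_span : Int × Int) : List Int :=
  let first_start := min subject_span.1 object_span.1
  let second_start := max subject_span.1 object_span.1
  (PySem.List.pyRange 0 sequence_length 1).foldl
    (fun piece_ids token_index =>
      if token_index ≤ first_start then piece_ids ++ [1]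
      else if token_index < second_start then piece_ids ++ [2]
      else piece_ids ++ [3]) []

-- ===== PORT B =====
def build_piece_ids_py_alt (sequence_length : Int) (subject_span : Int × Int) (object_span : Int × Int) : List Int :=
  let first_start := min subject_span.1 object_span.1
  let second_start := max subject_span.1 object_span.1
  let n1 := max 0 (min (first_start + 1) sequence_length)
  let n2 := max 0 (min second_start sequence_length - n1)
  let n3 := sequence_length - n1 - n2
  List.replicate n1.toNat 1 ++ List.replicate n2.toNat 2 ++ List.replicate n3.toNat 3

-- ===== PRECONDITION & SPEC =====
def Spec_build_piece_ids_py (sequence_length : Int) (subject_span : Int × Int) (object_span : Int × Int) (out : List Int) : Prop := out = build_piece_ids_py_alt sequence_length subject_span object_span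
instance (sequence_length : Int) (subject_span : Int × Int) (object_span : Int × Int) (out : List Int) : Decidable (Spec_build_piece_ids_py sequence_length subject_span object_span out) := by unfold Spec_build_piece_ids_py; infer_instance

-- ===== CLAIM (what is proved, stated in full; the proofs are below) =====
def Claim_equal_build_piece_ids_py : Prop := ∀ (sequence_length : Int) (subject_span : Int × Int) (object_span : Int × Int), Dom_build_piece_ids_py sequence_length subject_span object_span → Spec_build_piece_ids_py sequence_length subject_span object_span (build_piece_ids_py sequence_length subject_span object_span)

-- ===== LEMMAS AND PROOFS =====

-- A's loop body written as a single map function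
theorem pv_loop_as_map (fs ss : Int) (n : Int) :
    (PySem.List.pyRange 0 n 1).foldl
      (fun acc i => if i ≤ fs then acc ++ [(1:Int)] else if i < ss then acc ++ [2] else acc ++ [3]) []
    = (List.range n.toNat).map
        (fun (k : Nat) => if (k:Int) ≤ fs then (1:Int) else if (k:Int) < ss then 2 else 3) := by
  have h : (PySem.List.pyRange 0 n 1).foldl
      (fun acc i => if i ≤ fs then acc ++ [(1:Int)] else if i < ss then acc ++ [2] else acc ++ [3]) []
      = (PySem.List.pyRange 0 n 1).foldl
      (fun acc i => acc ++ [if i ≤ fs then (1:Int) else if i < ss then 2 else 3]) [] := by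
    apply PySem.List.foldl_congr_mem
    intro acc i _
    split_ifs <;> rfl
  rw [h, PySem.List.foldl_append_singleton_eq_map, PySem.List.pyRange_one]
  simp only [List.nil_append, List.map_map, Function.comp_def, zero_add, sub_zero]

theorem pv_blocks (fs ss n : Int) (hfs : fs ≤ ss) :
    (List.range n.toNat).map
        (fun (k : Nat) => if (k:Int) ≤ fs then (1:Int) else if (k:Int) < ss then 2 else 3)
    = List.replicate (max 0 (min (fs + 1) n)).toNat 1
      ++ List.replicate (max 0 (min ss n - max 0 (min (fs + 1) n))).toNat 2
      ++ List.replicate (n - max 0 (min (fs + 1) n) - max 0 (min ss n - max 0 (min (fs + 1) n))).toNat 3 := by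
  set n1 : Int := max 0 (min (fs + 1) n) with hn1
  set n2 : Int := max 0 (min ss n - n1) with hn2
  set n3 : Int := n - n1 - n2 with hn3
  apply List.ext_getElem
  · simp only [List.length_map, List.length_range, List.length_append, List.length_replicate]
    omega
  · intro i h1 h2
    simp only [List.length_map, List.length_range] at h1
    simp only [List.getElem_map, List.getElem_range, List.append_assoc]
    by_cases c1 : i < n1.toNat
    · rw [List.getElem_append_left (by simpa using c1)]
      rw [List.getElem_replicate]
      have hif : (i:Int) ≤ fs := by omega
      simp [hif]
    · rw [List.getElem_append_right (by simpa using c1)]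
      by_cases c2 : i - n1.toNat < n2.toNat
      · rw [List.getElem_append_left (by simpa using c2)]
        rw [List.getElem_replicate]
        have h3 : ¬ (i:Int) ≤ fs := by omega
        have h4 : (i:Int) < ss := by omega
        simp [h3, h4]
      · rw [List.getElem_append_right (by simpa using c2)]
        rw [List.getElem_replicate]
        have h3 : ¬ (i:Int) ≤ fs := by omega
        have h4 : ¬ (i:Int) < ss := by omega
        simp [h3, h4]

-- ===== VERDICT (by name: the statement is the Claim_ definition above) =====
theorem build_piece_ids_py_spec : Claim_equal_build_piece_ids_py := by
  intro n sp op _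
  unfold Spec_build_piece_ids_py build_piece_ids_py build_piece_ids_py_alt
  simp only []
  rw [pv_loop_as_map, pv_blocks]
  exact min_le_max
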